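-- pv_equiv track=rewrite | github.com/rudyrdx/music-streamer | services/chunker/chunker.py | find_frame_positions
-- ===== SOURCE A (Python) =====
-- def find_frame_positions(data):
--     frame_positions = []
--     data_len = len(data)
--     i = 0
--     while i < data_len - 1:
--         byte1 = data[i]
--         byte2 = data[i+1]
--         word = (byte1 << 8) | byte2
--         # The FLAC frame sync code is 14 bits: 0x3FFE
--         sync = (word >> 2) & 0x3FFF  # Get top 14 bits
--         if sync == 0x3FFE:
--             # Found a frame sync code
--             frame_positions.append(i)
--             i += 2  # Move past the sync code
--         else:
--             i += 1
--     return frame_positions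
-- ===== SOURCE B (Python) =====
-- def find_frame_positions(data):
--     # Stage 1: every index whose adjacent byte pair carries the 14-bit FLAC
--     # frame sync code 0x3FFE.
--     candidates = [i for i in range(len(data) - 1)
--                   if ((((data[i] << 8) | data[i + 1]) >> 2) & 0x3FFF) == 0x3FFE]
--     # Stage 2: frame starts cannot overlap, so drop a candidate that starts
--     # inside the previously kept frame's sync word.
--     positions = []
--     for i in candidates:
--         if not positions or positions[-1] != i - 1:
--             positions.append(i)
--     return positions
-- ===== Notes on version B (the rewrite author's own statement) =====
-- stated objective: alternative
-- what changed: B replaces A's single while-loop with manual index advancement (i += 2 after a match) by two staged passes: a comprehension collecting every index whose pair matches the sync code, then a greedy filter that drops a candidate adjacent to the previously kept one.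
import Mathlib
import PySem

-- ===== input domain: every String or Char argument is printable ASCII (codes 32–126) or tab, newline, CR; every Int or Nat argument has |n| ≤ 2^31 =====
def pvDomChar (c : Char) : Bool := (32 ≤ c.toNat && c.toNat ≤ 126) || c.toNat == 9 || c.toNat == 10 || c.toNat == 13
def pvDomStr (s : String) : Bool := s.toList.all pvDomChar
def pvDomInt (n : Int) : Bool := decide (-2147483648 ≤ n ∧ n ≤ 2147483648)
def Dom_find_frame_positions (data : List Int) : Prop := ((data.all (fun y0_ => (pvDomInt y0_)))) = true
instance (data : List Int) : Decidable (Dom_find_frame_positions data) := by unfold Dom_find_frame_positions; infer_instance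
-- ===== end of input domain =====

-- B replaces A's single while-loop with manual index advancement (i += 2 after a
-- match) by two staged passes: a comprehension collecting every sync-matching
-- index, then a greedy filter dropping candidates adjacent to the last kept one.

-- ===== PORT A =====
-- A's while-loop: i advances by 2 after a match, else by 1.  byte1 = data[i],
-- byte2 = data[i+1]; the loop guard keeps both indices in range, so pyGetD's
-- default 0 is never read (Python's data[i] cannot raise here).
-- word = (byte1 << 8) | byte2, sync = (word >> 2) & 0x3FFF, compared to 0x3FFE.
def pvALoop (data : List Int) (n i : Int) (acc : List Int) : List Int :=
  if h : i < n - 1 then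
    if PySem.Int.band
        ((PySem.Int.bor ((PySem.List.pyGetD data i 0) <<< (8 : Nat))
          (PySem.List.pyGetD data (i + 1) 0)) >>> (2 : Nat)) 16383 = 16382 then
      pvALoop data n (i + 2) (acc ++ [i])
    else
      pvALoop data n (i + 1) acc
  else acc
  termination_by (n - i).toNat
  decreasing_by all_goals omega

def find_frame_positions (data : List Int) : List Int :=
  pvALoop data (data.length : Int) 0 []

-- ===== PORT B =====
-- the comprehension's condition: (((data[i] << 8) | data[i+1]) >> 2) & 0x3FFF == 0x3FFE
def pvCandB (data : List Int) (i : Int) : Bool :=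
  PySem.Int.band
    ((PySem.Int.bor ((PySem.List.pyGetD data i 0) <<< (8 : Nat))
      (PySem.List.pyGetD data (i + 1) 0)) >>> (2 : Nat)) 16383 == 16382

-- stage-2 loop body: if not positions or positions[-1] != i - 1: positions.append(i)
def pvGreedyStep (positions : List Int) (i : Int) : List Int :=
  if positions = [] ∨ positions.getLast? ≠ some (i - 1) then positions ++ [i]
  else positions

-- candidates = [i for i in range(len(data) - 1) if <sync test>]; then the
-- stage-2 for-loop folds pvGreedyStep over the candidates.
def find_frame_positions_alt (data : List Int) : List Int :=
  ((PySem.List.pyRange 0 ((data.length : Int) - 1) 1).filter (pvCandB data)).foldl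
    pvGreedyStep []

-- ===== PRECONDITION & SPEC =====
def Spec_find_frame_positions (data : List Int) (out : List Int) : Prop := out = find_frame_positions_alt data
instance (data : List Int) (out : List Int) : Decidable (Spec_find_frame_positions data out) := by unfold Spec_find_frame_positions; infer_instance

-- ===== CLAIM (what is proved, stated in full; the proofs are below) =====
def Claim_equal_find_frame_positions : Prop := ∀ (data : List Int), Dom_find_frame_positions data → Spec_find_frame_positions data (find_frame_positions data)

-- ===== LEMMAS AND PROOFS =====

-- the greedy step appends when every element already kept is below i - 1
theorem pv_step_append (acc : List Int) (i : Int)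
    (h : ∀ a ∈ acc, a + 1 < i) : pvGreedyStep acc i = acc ++ [i] := by
  unfold pvGreedyStep
  rw [if_pos (Or.inr (by
    intro hc
    have hm := h _ (List.mem_of_mem_getLast? (Option.mem_def.mpr hc))
    omega))]

-- the greedy step skips a candidate right after the last kept one
theorem pv_step_skip (acc : List Int) (k : Int) :
    pvGreedyStep (acc ++ [k]) (k + 1) = acc ++ [k] := by
  unfold pvGreedyStep
  rw [if_neg]
  simp

-- loop correspondence: A's loop from index k equals the greedy fold over the
-- candidates at indices ≥ k, provided everything kept so far lies below k - 1
theorem pv_key (data : List Int) (m : Nat) : ∀ (k : Int) (acc : List Int),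
    (data.length : Int) - 1 ≤ k + m → (∀ a ∈ acc, a + 1 < k) →
    pvALoop data (data.length : Int) k acc
      = ((PySem.List.pyRange k ((data.length : Int) - 1) 1).filter (pvCandB data)).foldl
          pvGreedyStep acc := by
  induction m with
  | zero =>
    intro k acc hk _
    rw [pvALoop, dif_neg (by omega), PySem.List.pyRange_one_eq_nil (by omega)]
    simp
  | succ m ih =>
    intro k acc hk hinv
    by_cases h : k < (data.length : Int) - 1
    · rw [pvALoop, dif_pos h, PySem.List.pyRange_one_cons h, List.filter_cons]
      by_cases hc : pvCandB data k = true
      · rw [if_pos (by simpa [pvCandB, beq_iff_eq] using hc), if_pos hc, List.foldl_cons,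
          pv_step_append acc k hinv]
        by_cases h2 : k + 1 < (data.length : Int) - 1
        · rw [PySem.List.pyRange_one_cons h2, List.filter_cons]
          by_cases hc2 : pvCandB data (k + 1) = true
          · rw [if_pos hc2, List.foldl_cons, pv_step_skip]
            rw [show k + 1 + 1 = k + 2 from by ring]
            exact ih (k + 2) (acc ++ [k]) (by omega)
              (by intro a ha; rcases List.mem_append.mp ha with h' | h'
                  · have := hinv a h'; omega
                  · simp at h'; omega)
          · rw [if_neg hc2]
            rw [show k + 1 + 1 = k + 2 from by ring]
            exact ih (k + 2) (acc ++ [k]) (by omega)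
              (by intro a ha; rcases List.mem_append.mp ha with h' | h'
                  · have := hinv a h'; omega
                  · simp at h'; omega)
        · rw [PySem.List.pyRange_one_eq_nil (by omega)]
          rw [pvALoop, dif_neg (by omega)]
          simp
      · rw [if_neg (by simpa [pvCandB, beq_iff_eq] using hc), if_neg hc]
        exact ih (k + 1) acc (by omega)
          (by intro a ha; have := hinv a ha; omega)
    · rw [pvALoop, dif_neg (by omega), PySem.List.pyRange_one_eq_nil (by omega)]
      simp

-- ===== VERDICT (by name: the statement is the Claim_ definition above) =====
theorem find_frame_positions_spec : Claim_equal_find_frame_positions := by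
  intro data _
  unfold Spec_find_frame_positions find_frame_positions find_frame_positions_alt
  exact pv_key data data.length 0 [] (by omega) (by intro a ha; simp at ha)
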